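-- pv_equiv track=rewrite | github.com/achrafaglmous98/scrappingBBC_airflow | dags/processing_cleaning_inserting_data_dag.py | get_list_of_authors
-- ===== SOURCE A (Python) =====
-- def remove_after_cap(string):
--
--     #Remove all characters that come after a directly attached capital letter in a string
--     new_string = ''
--     for i, char in enumerate(string):
--         if i == 0:
--             new_string += char
--         elif char.isupper() and string[i-1].islower():
--             if string[i-2 : i] == 'Mc':
--                 new_string += char
--             else:
--                 break
--         else:
--             new_string += char
--     return new_string
--
-- def get_list_of_authors(authors):
--
--     if not isinstance(authors, str):
--         return ["N/A"]
--
--     # Remove any characters that come after a directly attached capital letter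
--     authors = remove_after_cap(authors)
--
--     # Split the string by "and"
--     parts = authors.replace(" & ", " and ").split(" and ")
--
--     # Extract the author names from each part
--     authors = []
--     for part in parts:
--         if "By " in part:
--             first_author_name = part.split("By ")[1].split()
--             author = " ".join(first_author_name[:2])
--             authors.append(author)
--         else:
--             name_words = part.strip().split()
--             author = " ".join(name_words[:2])
--             authors.append(author)
--
--     # Return the list of author names
--     return authors
-- ===== SOURCE B (Python) =====
-- def get_list_of_authors(authors):
--     if not isinstance(authors, str):
--         return ["N/A"]
--     # find the first cut position instead of building a new string char by char
--     cut = len(authors)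
--     for i in range(1, len(authors)):
--         if authors[i].isupper() and authors[i-1].islower() and authors[i-2:i] != 'Mc':
--             cut = i
--             break
--     s = authors[:cut]
--     parts = s.replace(" & ", " and ").split(" and ")
--     return [" ".join((part.split("By ")[1] if "By " in part else part.strip()).split()[:2])
--             for part in parts]
-- ===== Notes on version B (the rewrite author's own statement) =====
-- stated objective: simpler
-- what changed: B replaces A's per-character accumulator string with a scan that only finds the first cut index and slices once, and builds the author list with a single comprehension instead of an append loop with duplicated join code.
import Mathlib
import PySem

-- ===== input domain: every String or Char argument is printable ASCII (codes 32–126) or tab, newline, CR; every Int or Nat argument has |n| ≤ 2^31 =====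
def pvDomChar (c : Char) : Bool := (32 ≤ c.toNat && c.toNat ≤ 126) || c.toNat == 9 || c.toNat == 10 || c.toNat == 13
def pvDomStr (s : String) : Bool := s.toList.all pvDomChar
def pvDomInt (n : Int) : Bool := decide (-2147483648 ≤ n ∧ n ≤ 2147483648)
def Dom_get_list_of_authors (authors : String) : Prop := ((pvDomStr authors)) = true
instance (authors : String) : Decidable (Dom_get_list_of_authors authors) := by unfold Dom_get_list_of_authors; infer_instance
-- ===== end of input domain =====

-- B replaces A's per-character accumulator with a single cut index found by a scan,
-- slices once, and builds the author list with a map instead of an append loop (objective: simpler).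

-- ===== PORT A =====
-- A's remove_after_cap: accumulate characters, break at an attached capital unless preceded by 'Mc'
def removeAfterCapGo (s : List Char) : Nat → List Char → List Char
  | _, [] => []
  | i, c :: rest =>
    if i = 0 then c :: removeAfterCapGo s (i + 1) rest
    else if PySem.Chars.isupper c && PySem.Chars.islower (s.getD (i - 1) ' ') then
      if PySem.List.slice s (some ((i : Int) - 2)) (some (i : Int)) = ['M', 'c'] then
        c :: removeAfterCapGo s (i + 1) rest
      else []
    else c :: removeAfterCapGo s (i + 1) rest

def remove_after_cap (s : List Char) : List Char := removeAfterCapGo s 0 s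

def get_list_of_authors (authors : String) : List String :=
  let s := remove_after_cap authors.toList
  let parts := PySem.Chars.splitOn (PySem.Chars.replace s " & ".toList " and ".toList) " and ".toList
  parts.foldl (fun acc part =>
    if PySem.Chars.isIn "By ".toList part then
      acc ++ [String.ofList (PySem.Chars.join " ".toList
        ((PySem.Chars.split₀ ((PySem.Chars.splitOn part "By ".toList).getD 1 [])).take 2))]
    else
      acc ++ [String.ofList (PySem.Chars.join " ".toList
        ((PySem.Chars.split₀ (PySem.Chars.strip part)).take 2))]) []

-- ===== PORT B =====
-- B: find the first cut position (no growing accumulator), slice once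
def findCut (s : List Char) (i : Nat) : Nat :=
  if i < s.length then
    if PySem.Chars.isupper (s.getD i ' ') && PySem.Chars.islower (s.getD (i - 1) ' ')
        && !(PySem.List.slice s (some ((i : Int) - 2)) (some (i : Int)) = ['M', 'c']) then i
    else findCut s (i + 1)
  else s.length
termination_by s.length - i

def get_list_of_authors_alt (authors : String) : List String :=
  let t := authors.toList
  let cut := findCut t 1
  let s := PySem.List.slice t none (some (cut : Int))
  let parts := PySem.Chars.splitOn (PySem.Chars.replace s " & ".toList " and ".toList) " and ".toList
  parts.map (fun part =>
    String.ofList (PySem.Chars.join " ".toList ((PySem.Chars.split₀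
      (if PySem.Chars.isIn "By ".toList part then (PySem.Chars.splitOn part "By ".toList).getD 1 []
       else PySem.Chars.strip part)).take 2)))

-- ===== PRECONDITION & SPEC =====
def Spec_get_list_of_authors (authors : String) (out : List String) : Prop := out = get_list_of_authors_alt authors
instance (authors : String) (out : List String) : Decidable (Spec_get_list_of_authors authors out) := by unfold Spec_get_list_of_authors; infer_instance

-- ===== CLAIM (what is proved, stated in full; the proofs are below) =====
def Claim_equal_get_list_of_authors : Prop := ∀ (authors : String), Dom_get_list_of_authors authors → Spec_get_list_of_authors authors (get_list_of_authors authors)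

-- ===== LEMMAS AND PROOFS =====

theorem le_findCut (s : List Char) : ∀ i, i ≤ s.length → i ≤ findCut s i := by
  intro i
  induction i using findCut.induct s with
  | case1 i h hc => intro _; unfold findCut; rw [if_pos h, if_pos hc]
  | case2 i h hc ih =>
    intro _
    unfold findCut
    rw [if_pos h, if_neg hc]
    have := ih (by omega)
    omega
  | case3 i h => intro hle; unfold findCut; rw [if_neg h]; omega

theorem goA_eq_take (s : List Char) : ∀ i, 1 ≤ i →
    removeAfterCapGo s i (s.drop i) = (s.drop i).take (findCut s i - i) := by
  intro i
  induction i using findCut.induct s with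
  | case1 i h hc =>
    intro hi
    have hgd : s[i]?.getD ' ' = s[i] := by rw [List.getElem?_eq_getElem h]; rfl
    rw [List.drop_eq_getElem_cons h]
    unfold removeAfterCapGo findCut
    simp only [List.getD_eq_getElem?_getD] at hc ⊢
    rw [hgd] at hc ⊢
    have hc' := hc
    simp only [Bool.and_eq_true, Bool.not_eq_true', decide_eq_false_iff_not] at hc'
    obtain ⟨⟨hc1, hc2⟩, hc3⟩ := hc'
    rw [if_neg (by omega : ¬ i = 0), if_pos (by simp [hc1, hc2]), if_neg hc3,
      if_pos h, if_pos hc, Nat.sub_self, List.take_zero]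
  | case2 i h hc ih =>
    intro hi
    have hgd : s[i]?.getD ' ' = s[i] := by rw [List.getElem?_eq_getElem h]; rfl
    rw [List.drop_eq_getElem_cons h]
    unfold removeAfterCapGo findCut
    simp only [List.getD_eq_getElem?_getD] at hc ⊢
    rw [hgd] at hc ⊢
    rw [if_neg (by omega : ¬ i = 0), if_pos h, if_neg hc]
    have hge := le_findCut s (i + 1) (by omega)
    have hrec := ih (by omega)
    have hsub : findCut s (i + 1) - i = (findCut s (i + 1) - (i + 1)) + 1 := by omega
    rw [hsub, List.take_succ_cons, hrec]
    by_cases hU : (PySem.Chars.isupper s[i] && PySem.Chars.islower (s[i - 1]?.getD ' ')) = true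
    · have hM : PySem.List.slice s (some ((i : Int) - 2)) (some (i : Int)) = ['M', 'c'] := by
        by_contra hM
        exact hc (by simp [hU, hM])
      rw [if_pos hU, if_pos hM]
    · rw [if_neg hU]
  | case3 i h =>
    intro hi
    have hlen : s.length ≤ i := by omega
    rw [List.drop_eq_nil_of_le hlen]
    unfold removeAfterCapGo
    simp

theorem remove_after_cap_eq (t : List Char) :
    remove_after_cap t = PySem.List.slice t none (some ((findCut t 1 : Nat) : Int)) := by
  rw [PySem.List.slice_to t (Int.natCast_nonneg _), Int.toNat_natCast]
  cases t with
  | nil =>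
    unfold remove_after_cap removeAfterCapGo
    simp
  | cons c t' =>
    have h1 : 1 ≤ findCut (c :: t') 1 := le_findCut (c :: t') 1 (by simp)
    have hg := goA_eq_take (c :: t') 1 (le_refl 1)
    simp only [List.drop_succ_cons, List.drop_zero] at hg
    unfold remove_after_cap removeAfterCapGo
    rw [if_pos rfl]
    have hsub : findCut (c :: t') 1 = (findCut (c :: t') 1 - 1) + 1 := by omega
    rw [hsub, List.take_succ_cons, show (0 + 1 = 1) from rfl, hg]

theorem foldl_parts_eq_map (parts : List (List Char)) (acc : List String) :
    parts.foldl (fun acc part =>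
      if PySem.Chars.isIn "By ".toList part then
        acc ++ [String.ofList (PySem.Chars.join " ".toList
          ((PySem.Chars.split₀ ((PySem.Chars.splitOn part "By ".toList).getD 1 [])).take 2))]
      else
        acc ++ [String.ofList (PySem.Chars.join " ".toList
          ((PySem.Chars.split₀ (PySem.Chars.strip part)).take 2))]) acc
    = acc ++ parts.map (fun part =>
        String.ofList (PySem.Chars.join " ".toList ((PySem.Chars.split₀
          (if PySem.Chars.isIn "By ".toList part then (PySem.Chars.splitOn part "By ".toList).getD 1 []
           else PySem.Chars.strip part)).take 2))) := by
  induction parts generalizing acc with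
  | nil => simp
  | cons p ps ih =>
    simp only [List.foldl_cons, List.map_cons]
    rw [ih]
    by_cases hB : PySem.Chars.isIn "By ".toList p = true
    · simp only [if_pos hB]; simp
    · simp only [if_neg hB]; simp

-- ===== VERDICT (by name: the statement is the Claim_ definition above) =====
theorem get_list_of_authors_spec : Claim_equal_get_list_of_authors := by
  intro authors _
  show get_list_of_authors authors = get_list_of_authors_alt authors
  unfold get_list_of_authors get_list_of_authors_alt
  rw [remove_after_cap_eq, foldl_parts_eq_map]
  simp
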